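-- pv_equiv track=rewrite | github.com/GuidanceOfGrace/CLASSIC-Fallout4 | CL TOOLS/CL Full Sort.py | find_plugin_index_and_validate
-- ===== SOURCE A (Python) =====
-- def find_plugin_index_and_validate(all_lines, error_line):
--     plugin_idx = 0
--     check_valid = False
--     for line in all_lines:
--         if "F4SE" not in line and "PLUGINS:" in line:
--             plugin_idx = all_lines.index(line)
--         if "[00]" in line:
--             check_valid = True
--     if "exception" not in error_line.lower():
--         check_valid = False
--
--     return plugin_idx, check_valid
-- ===== SOURCE B (Python) =====
-- def find_plugin_index_and_validate(all_lines, error_line):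
--     plugin_idx = 0
--     for i, line in reversed(list(enumerate(all_lines))):
--         if "F4SE" not in line and "PLUGINS:" in line:
--             plugin_idx = i
--             break
--     check_valid = any("[00]" in line for line in all_lines) and "exception" in error_line.lower()
--     return plugin_idx, check_valid
-- ===== Notes on version B (the rewrite author's own statement) =====
-- stated objective: simpler
-- what changed: replaces A's forward loop that rescans the list with all_lines.index() on every matching line by a backward scan that stops at the last matching line and returns its own index, plus a plain any() for the validity flag
-- intended difference: when the last line containing 'PLUGINS:' (without 'F4SE') has an identical earlier duplicate line, A returns the index of the earlier duplicate (an artefact of .index()), while B returns the index of the last matching line itself, which is the section position the loop evidently tracks — e.g. on find_plugin_index_and_validate(["PLUGINS:", "PLUGINS:"], ""): A returns (0, false), B returns (1, false)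
import Mathlib
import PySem

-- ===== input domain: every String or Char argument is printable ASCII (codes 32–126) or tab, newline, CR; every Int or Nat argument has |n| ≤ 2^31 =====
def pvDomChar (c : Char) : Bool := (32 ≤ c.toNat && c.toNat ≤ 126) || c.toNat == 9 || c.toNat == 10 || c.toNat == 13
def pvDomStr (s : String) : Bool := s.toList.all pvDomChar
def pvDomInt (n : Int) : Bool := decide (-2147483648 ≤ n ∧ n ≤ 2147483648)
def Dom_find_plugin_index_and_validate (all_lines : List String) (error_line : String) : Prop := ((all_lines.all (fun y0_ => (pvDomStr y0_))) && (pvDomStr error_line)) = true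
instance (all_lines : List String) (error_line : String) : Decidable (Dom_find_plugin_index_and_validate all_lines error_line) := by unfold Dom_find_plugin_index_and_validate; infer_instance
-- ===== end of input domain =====

-- B scans backwards and stops at the last matching line, returning that line's own index,
-- instead of A's forward loop that rescans the list with .index() on every matching line
-- (objective: simpler).

-- ===== PORT A =====
-- loop body of A: per line, maybe recompute plugin_idx via all_lines.index(line), maybe set check_valid
-- (all_lines.index(line) cannot raise here since line ∈ all_lines; the .getD st.1 branch is unreachable)
def pvStepA (all_lines : List String) (st : Int × Bool) (line : String) : Int × Bool :=
  let idx := if !PySem.Str.isIn "F4SE" line && PySem.Str.isIn "PLUGINS:" line then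
               ((PySem.List.index? all_lines line).map (fun n : Nat => (n : Int))).getD st.1
             else st.1
  let valid := if PySem.Str.isIn "[00]" line then true else st.2
  (idx, valid)

def find_plugin_index_and_validate (all_lines : List String) (error_line : String) : Int × Bool :=
  let st := all_lines.foldl (pvStepA all_lines) (0, false)
  if !(PySem.Str.isIn "exception" (PySem.Str.lower error_line)) then (st.1, false) else st

-- ===== PORT B =====
-- B's backward loop with break: first match of the reversed enumerate wins, default 0
def pvScanBack : List (Int × String) → Int
  | [] => 0
  | (i, line) :: rest =>
      if !PySem.Str.isIn "F4SE" line && PySem.Str.isIn "PLUGINS:" line then i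
      else pvScanBack rest

def find_plugin_index_and_validate_alt (all_lines : List String) (error_line : String) : Int × Bool :=
  let plugin_idx := pvScanBack ((PySem.List.enumerate all_lines 0).reverse)
  let check_valid := (all_lines.any (fun line => PySem.Str.isIn "[00]" line))
                       && PySem.Str.isIn "exception" (PySem.Str.lower error_line)
  (plugin_idx, check_valid)

-- ===== PRECONDITION & SPEC =====
-- a "plugin section header" line: contains "PLUGINS:" but not "F4SE"
def pvPlug (line : String) : Bool :=
  decide ("PLUGINS:".toList <:+: line.toList ∧ ¬ "F4SE".toList <:+: line.toList)

-- when the last line containing "PLUGINS:" (without "F4SE") has an identical earlier duplicate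
-- line, A returns the index of the earlier duplicate (an artefact of .index()), while B returns
-- the index of the last matching line itself, which is the section position the loop evidently tracks
def D_find_plugin_index_and_validate (all_lines : List String) (error_line : String) : Prop :=
  ∃ l ∈ all_lines, (all_lines.filter pvPlug).getLast? = some l ∧ 2 ≤ all_lines.count l
instance (all_lines : List String) (error_line : String) : Decidable (D_find_plugin_index_and_validate all_lines error_line) := by unfold D_find_plugin_index_and_validate; infer_instance

def Spec_find_plugin_index_and_validate (all_lines : List String) (error_line : String) (out : Int × Bool) : Prop := ¬ D_find_plugin_index_and_validate all_lines error_line → out = find_plugin_index_and_validate_alt all_lines error_line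
instance (all_lines : List String) (error_line : String) (out : Int × Bool) : Decidable (Spec_find_plugin_index_and_validate all_lines error_line out) := by unfold Spec_find_plugin_index_and_validate; infer_instance

def pvDiffWitness_find_plugin_index_and_validate : List String × String := (["PLUGINS:", "PLUGINS:"], "")
def pvDiffWitnessOut_find_plugin_index_and_validate : (Int × Bool) × (Int × Bool) := ((0, false), (1, false))

-- ===== CLAIM (what is proved, stated in full; the proofs are below) =====
def Claim_unchanged_find_plugin_index_and_validate : Prop := ∀ (all_lines : List String) (error_line : String), Dom_find_plugin_index_and_validate all_lines error_line → Spec_find_plugin_index_and_validate all_lines error_line (find_plugin_index_and_validate all_lines error_line)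
def Claim_changed_find_plugin_index_and_validate : Prop := Dom_find_plugin_index_and_validate (pvDiffWitness_find_plugin_index_and_validate.1) (pvDiffWitness_find_plugin_index_and_validate.2) ∧ D_find_plugin_index_and_validate (pvDiffWitness_find_plugin_index_and_validate.1) (pvDiffWitness_find_plugin_index_and_validate.2) ∧ find_plugin_index_and_validate (pvDiffWitness_find_plugin_index_and_validate.1) (pvDiffWitness_find_plugin_index_and_validate.2) = pvDiffWitnessOut_find_plugin_index_and_validate.1 ∧ find_plugin_index_and_validate_alt (pvDiffWitness_find_plugin_index_and_validate.1) (pvDiffWitness_find_plugin_index_and_validate.2) = pvDiffWitnessOut_find_plugin_index_and_validate.2 ∧ pvDiffWitnessOut_find_plugin_index_and_validate.1 ≠ pvDiffWitnessOut_find_plugin_index_and_validate.2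
def Claim_exact_find_plugin_index_and_validate : Prop := ∀ (all_lines : List String) (error_line : String), Dom_find_plugin_index_and_validate all_lines error_line → D_find_plugin_index_and_validate all_lines error_line → find_plugin_index_and_validate all_lines error_line ≠ find_plugin_index_and_validate_alt all_lines error_line

-- ===== LEMMAS AND PROOFS =====

-- the Boolean match predicate of both loops
def pvMP (line : String) : Bool := !PySem.Str.isIn "F4SE" line && PySem.Str.isIn "PLUGINS:" line

lemma pvPlug_eq (l : String) : pvPlug l = pvMP l := by
  have i1 := PySem.Str.isIn_iff_infix "F4SE" l
  have i2 := PySem.Str.isIn_iff_infix "PLUGINS:" l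
  cases h1 : PySem.Str.isIn "F4SE" l <;> cases h2 : PySem.Str.isIn "PLUGINS:" l <;>
    rw [h1] at i1 <;> rw [h2] at i2 <;>
    simp at i1 i2 h1 h2 <;> simp [pvPlug, pvMP, h1, h2, i1, i2]

-- index (from the front) of the LAST matching line, if any
def pvLast? : List String → Option Nat
  | [] => none
  | x :: xs =>
      match pvLast? xs with
      | some k => some (k + 1)
      | none => if pvMP x then some 0 else none

lemma pvLast?_none {xs : List String} :
    pvLast? xs = none ↔ ∀ l ∈ xs, pvMP l = false := by
  induction xs with
  | nil => simp [pvLast?]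
  | cons x xs ih =>
    cases h : pvLast? xs with
    | some k =>
      simp only [pvLast?, h]
      constructor
      · intro hc; exact absurd hc (by simp)
      · intro hall
        exact absurd (ih.mpr fun l hl => hall l (List.mem_cons_of_mem _ hl)) (by simp [h])
    | none =>
      have := ih.mp h
      cases hm : pvMP x <;> simp [pvLast?, h, hm]
      exact this

lemma pvLast?_spec {xs : List String} {k : Nat} (h : pvLast? xs = some k) :
    ∃ hk : k < xs.length, pvMP xs[k] = true ∧
      ∀ j (hj : j < xs.length), k < j → pvMP xs[j] = false := by
  induction xs generalizing k with
  | nil => simp [pvLast?] at h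
  | cons x xs ih =>
    cases h' : pvLast? xs with
    | some k' =>
      rw [pvLast?, h'] at h
      cases h
      obtain ⟨hk, hm, hafter⟩ := ih h'
      refine ⟨by simpa using Nat.succ_lt_succ hk, by simpa using hm, ?_⟩
      intro j hj hgt
      match j, hgt with
      | j + 1, hgt =>
        simpa using hafter j (by simpa using hj) (Nat.lt_of_succ_lt_succ hgt)
    | none =>
      rw [pvLast?, h'] at h
      by_cases hm : pvMP x = true
      · rw [if_pos hm] at h
        cases h
        refine ⟨by simp, by simpa using hm, ?_⟩
        intro j hj hgt
        match j, hgt with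
        | j + 1, _ =>
          exact pvLast?_none.mp h' _ (by
            have : j < xs.length := by simpa using hj
            exact List.getElem_mem this)
      · rw [if_neg hm] at h; cases h

-- characterization of A's fold
lemma pvAfold (al : List String) :
    ∀ (suf : List String) (idx : Int) (v : Bool), (∀ l ∈ suf, l ∈ al) →
      suf.foldl (pvStepA al) (idx, v) =
        (((pvLast? suf).map (fun k : Nat =>
            ((PySem.List.index? al (suf.getD k "")).map (fun n : Nat => (n : Int))).getD 0)).getD idx,
         v || suf.any (fun l => PySem.Str.isIn "[00]" l)) := by
  intro suf
  induction suf with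
  | nil => intro idx v _; simp [pvLast?]
  | cons l r ih =>
    intro idx v hmem
    have hl : l ∈ al := hmem l (by simp)
    obtain ⟨kl, hkl⟩ := Option.isSome_iff_exists.mp
      ((PySem.List.index?_isSome_iff al l).mpr hl)
    have hstep : pvStepA al (idx, v) l =
        (if pvMP l then ((PySem.List.index? al l).map (fun n : Nat => (n : Int))).getD 0 else idx,
         v || PySem.Str.isIn "[00]" l) := by
      simp only [pvStepA, pvMP, hkl, Prod.mk.injEq]
      refine ⟨?_, ?_⟩
      · split_ifs <;> simp
      · cases h00 : PySem.Str.isIn "[00]" l <;> cases v <;> simp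
    rw [List.foldl_cons, hstep, ih _ _ (fun x hx => hmem x (by simp [hx]))]
    cases hr : pvLast? r with
    | some k =>
      simp only [pvLast?, hr, List.getD_cons_succ, List.any_cons, Option.map_some,
        Option.getD_some, Prod.mk.injEq]
      refine ⟨trivial, ?_⟩
      cases PySem.Str.isIn "[00]" l <;> cases v <;> simp
    | none =>
      simp only [pvLast?, hr, List.any_cons, Option.map_none, Option.getD_none, Prod.mk.injEq]
      refine ⟨?_, ?_⟩
      · cases hm : pvMP l <;> simp [hm]
      · cases PySem.Str.isIn "[00]" l <;> cases v <;> simp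

-- pvScanBack over an append: the front wins if it contains a match
lemma pvScanBack_append (L1 L2 : List (Int × String)) :
    pvScanBack (L1 ++ L2) =
      if L1.any (fun p => pvMP p.2) then pvScanBack L1 else pvScanBack L2 := by
  induction L1 with
  | nil => simp
  | cons p L1 ih =>
    obtain ⟨i, line⟩ := p
    by_cases hm : pvMP line = true
    · simp [pvScanBack, pvMP] at hm ⊢
      simp [hm]
    · simp only [List.cons_append, pvScanBack, List.any_cons]
      rw [show (!PySem.Str.isIn "F4SE" line && PySem.Str.isIn "PLUGINS:" line) = pvMP line from rfl]
      simp only [Bool.not_eq_true] at hm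
      rw [ih, hm]
      cases hA : L1.any (fun p => pvMP p.2) <;> simp [hA]

lemma pvAny_enum_reverse (xs : List String) (t : Int) :
    ((PySem.List.enumerate xs t).reverse.any (fun p => pvMP p.2)) = xs.any pvMP := by
  rw [List.any_reverse]
  conv_rhs => rw [← PySem.List.map_snd_enumerate xs t]
  rw [List.any_map]
  rfl

-- characterization of B's backward scan
lemma pvBscan (xs : List String) : ∀ (t : Int),
    pvScanBack ((PySem.List.enumerate xs t).reverse) =
      ((pvLast? xs).map (fun k : Nat => t + (k : Int))).getD 0 := by
  induction xs with
  | nil => intro t; simp [PySem.List.enumerate, pvScanBack, pvLast?]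
  | cons x xs ih =>
    intro t
    rw [PySem.List.enumerate_cons, List.reverse_cons, pvScanBack_append, pvAny_enum_reverse]
    cases h : pvLast? xs with
    | some k =>
      have hany : xs.any pvMP = true := by
        cases hA : xs.any pvMP
        · exact absurd (pvLast?_none.mpr (by simpa using hA)) (by simp [h])
        · rfl
      rw [if_pos hany, ih (t + 1)]
      simp only [pvLast?, h, Option.map_some, Option.getD_some]
      push_cast
      ring
    | none =>
      have hany : xs.any pvMP = false := by
        simp [List.any_eq_false]
        intro l hl
        simp [pvLast?_none.mp h l hl]
      rw [if_neg (by simp [hany])]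
      simp only [pvLast?, h, pvScanBack]
      rw [show (!PySem.Str.isIn "F4SE" x && PySem.Str.isIn "PLUGINS:" x) = pvMP x from rfl]
      cases hm : pvMP x <;> simp [hm]

lemma pvAresult (al : List String) (el : String) :
    find_plugin_index_and_validate al el =
      (((pvLast? al).map (fun k : Nat =>
          ((PySem.List.index? al (al.getD k "")).map (fun n : Nat => (n : Int))).getD 0)).getD 0,
       (al.any (fun l => PySem.Str.isIn "[00]" l)) && PySem.Str.isIn "exception" (PySem.Str.lower el)) := by
  unfold find_plugin_index_and_validate
  rw [pvAfold al al 0 false (fun _ h => h)]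
  cases hex : PySem.Str.isIn "exception" (PySem.Str.lower el) <;> simp

lemma pvBresult (al : List String) (el : String) :
    find_plugin_index_and_validate_alt al el =
      (((pvLast? al).map (fun k : Nat => (k : Int))).getD 0,
       (al.any (fun l => PySem.Str.isIn "[00]" l)) && PySem.Str.isIn "exception" (PySem.Str.lower el)) := by
  unfold find_plugin_index_and_validate_alt
  rw [pvBscan al 0]
  cases h : pvLast? al <;> simp

-- first occurrence of the last match's text: equals the last-match index when no earlier duplicate
-- the filtered matches end with the last-match line
lemma pvFilterMP_getLast : ∀ al : List String,
    (al.filter pvMP).getLast? = (pvLast? al).map (fun k : Nat => al.getD k "") := by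
  intro al
  induction al with
  | nil => simp [pvLast?]
  | cons x xs ih =>
    cases h : pvLast? xs with
    | some k =>
      have hne : xs.filter pvMP ≠ [] := by
        intro hnil
        rw [hnil] at ih
        simp [h] at ih
      rcases List.eq_nil_or_concat (xs.filter pvMP) with hnil | ⟨ys, y, hy⟩
      · exact absurd hnil hne
      · have hy2 : (xs.filter pvMP).getLast? = some y := by
          rw [hy, List.concat_eq_append, List.getLast?_concat]
        rw [ih, h] at hy2
        simp only [Option.map_some, Option.some.injEq] at hy2
        simp only [pvLast?, h, List.filter_cons]
        cases hm : pvMP x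
        · simp [hm, ih, h]
        · simp only [if_true, Option.map_some, List.getD_cons_succ]
          rw [hy, List.concat_eq_append, ← List.cons_append, List.getLast?_concat, hy2]
    | none =>
      have hnil : xs.filter pvMP = [] :=
        List.filter_eq_nil_iff.mpr (fun a ha => by simp [pvLast?_none.mp h a ha])
      simp only [pvLast?, h, List.filter_cons, hnil]
      cases hm : pvMP x <;> simp

lemma pvFilter_getLast (al : List String) :
    (al.filter pvPlug).getLast? = (pvLast? al).map (fun k : Nat => al.getD k "") := by
  rw [List.filter_congr (fun x _ => pvPlug_eq x), pvFilterMP_getLast]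

-- a duplicate text among the first k+1 positions gives count ≥ 2
lemma pvCount_two (al : List String) {i k : Nat} (hik : i < k) (hk : k < al.length)
    (heq : al[i]'(by omega) = al[k]) : 2 ≤ al.count al[k] := by
  have h1 : al[k] ∈ al.take k :=
    List.mem_take_iff_getElem.mpr ⟨i, by omega, heq⟩
  have h2 : al[k] ∈ al.drop k := by
    have : (al.drop k)[0]'(by simp; omega) = al[k] := by
      simp [List.getElem_drop]
    rw [← this]
    exact List.getElem_mem _
  have := List.take_append_drop k al
  calc 2 ≤ (al.take k).count al[k] + (al.drop k).count al[k] := by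
        have c1 := List.count_pos_iff.mpr h1
        have c2 := List.count_pos_iff.mpr h2
        omega
    _ = ((al.take k) ++ (al.drop k)).count al[k] := by rw [List.count_append]
    _ = al.count al[k] := by rw [this]

-- first occurrence of the last match's text: equals the last-match index when no earlier duplicate
lemma pvIndex_eq (al : List String) {k : Nat} (hlast : pvLast? al = some k)
    (hnD : ¬ D_find_plugin_index_and_validate al "") :
    PySem.List.index? al (al.getD k "") = some k := by
  obtain ⟨hk, hm, hafter⟩ := pvLast?_spec hlast
  have hgd : al.getD k "" = al[k] := List.getD_eq_getElem al "" hk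
  have hmem : al.getD k "" ∈ al := by rw [hgd]; exact List.getElem_mem hk
  obtain ⟨i, hi⟩ := Option.isSome_iff_exists.mp ((PySem.List.index?_isSome_iff al _).mpr hmem)
  obtain ⟨hilen, hival, hifirst⟩ := PySem.List.getElem_of_index?_eq_some hi
  have hle : i ≤ k := by
    by_contra hgt
    exact hifirst k (Nat.lt_of_not_le hgt) hgd.symm
  rcases Nat.lt_or_ge i k with hlt | hge
  · refine absurd ⟨al.getD k "", hmem, ?_, ?_⟩ hnD
    · rw [pvFilter_getLast, hlast]; rfl
    · rw [hgd]
      exact pvCount_two al hlt hk (by rw [hival, hgd])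
  · rw [hi, Nat.le_antisymm hle hge]

-- D_ does not depend on error_line
lemma pvD_iff (al : List String) (e1 e2 : String) :
    D_find_plugin_index_and_validate al e1 ↔ D_find_plugin_index_and_validate al e2 := Iff.rfl

-- ===== VERDICT (by name: the statement is the Claim_ definition above) =====
theorem find_plugin_index_and_validate_spec : Claim_unchanged_find_plugin_index_and_validate := by
  intro al el _ hnD
  rw [pvAresult, pvBresult]
  cases hlast : pvLast? al with
  | none => simp
  | some k =>
    simp only [Option.map_some, Option.getD_some]
    rw [pvIndex_eq al hlast ((pvD_iff al el "").not.mp hnD)]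
    simp

theorem find_plugin_index_and_validate_changed : Claim_changed_find_plugin_index_and_validate := by
  unfold Claim_changed_find_plugin_index_and_validate; decide

theorem find_plugin_index_and_validate_tight : Claim_exact_find_plugin_index_and_validate := by
  intro al el _ hD
  obtain ⟨l, hmem, hfl, hcnt⟩ := hD
  rw [pvFilter_getLast] at hfl
  obtain ⟨k, hlast, hlval⟩ := Option.map_eq_some_iff.mp hfl
  obtain ⟨hk, hmk, hafterk⟩ := pvLast?_spec hlast
  have hgd : al.getD k "" = al[k] := List.getD_eq_getElem al "" hk
  -- a second occurrence of l exists, necessarily before k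
  obtain ⟨n, m, hnm, hxn, hxm⟩ :=
    List.duplicate_iff_exists_distinct_get.mp (List.duplicate_iff_two_le_count.mpr hcnt)
  rw [List.get_eq_getElem] at hxm hxn
  have hmv : al[m.val]'m.isLt = l := hxm.symm
  have hnv : al[n.val]'n.isLt = l := hxn.symm
  have hmk' : m.val ≤ k := by
    by_contra hgt
    have hfalse := hafterk m.val m.isLt (by omega)
    rw [show al[m.val]'m.isLt = al[k] from by rw [hmv, ← hlval, hgd]] at hfalse
    exact absurd hmk (by simp [hfalse])
  -- A's plugin index is the first occurrence of l, strictly below k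
  have hmem' : al.getD k "" ∈ al := by rw [hgd]; exact List.getElem_mem hk
  obtain ⟨i, hi⟩ := Option.isSome_iff_exists.mp ((PySem.List.index?_isSome_iff al _).mpr hmem')
  obtain ⟨hilen, hival, hifirst⟩ := PySem.List.getElem_of_index?_eq_some hi
  have hin : i ≤ n.val := by
    by_contra hgt
    refine hifirst n.val (Nat.lt_of_not_le hgt) ?_
    rw [hnv, ← hlval]
  have hik : i < k := by omega
  intro heq
  rw [pvAresult, pvBresult, hlast] at heq
  have h1 := congrArg Prod.fst heq
  simp only [Option.map_some, Option.getD_some, hi] at h1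
  have : i = k := by exact_mod_cast h1
  omega
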